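-- pv_equiv track=rewrite | github.com/openvort/openvort | src/openvort/channels/feishu/channel.py | merge_streaming_text
-- ===== SOURCE A (Python) =====
-- def merge_streaming_text(previous_text: str | None, next_text: str | None) -> str:
--     previous = previous_text or ""
--     next_value = next_text or ""
--     if not next_value:
--         return previous
--     if not previous or next_value == previous:
--         return next_value
--     if next_value.startswith(previous) or next_value.find(previous) >= 0:
--         return next_value
--     if previous.startswith(next_value) or previous.find(next_value) >= 0:
--         return previous
--
--     max_overlap = min(len(previous), len(next_value))
--     for overlap in range(max_overlap, 0, -1):
--         if previous[-overlap:] == next_value[:overlap]: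
--             return previous + next_value[overlap:]
--     return previous + next_value
-- ===== SOURCE B (Python) =====
-- def merge_streaming_text(previous_text, next_text):
--     previous = previous_text or ""
--     nxt = next_text or ""
--     if not previous:
--         return nxt
--     if not nxt:
--         return previous
--     if previous in nxt:
--         return nxt
--     if nxt in previous:
--         return previous
--     # KMP prefix function of nxt
--     pi = [0] * len(nxt)
--     k = 0
--     for i in range(1, len(nxt)):
--         while k and nxt[i] != nxt[k]:
--             k = pi[k - 1]
--         if nxt[i] == nxt[k]:
--             k += 1
--         pi[i] = k
--     # stream previous through the prefix automaton; final k = longest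
--     # prefix of nxt that is a suffix of previous
--     k = 0
--     for c in previous:
--         while k and c != nxt[k]:
--             k = pi[k - 1]
--         if c == nxt[k]:
--             k += 1
--     return previous + nxt[k:]
-- ===== Notes on version B (the rewrite author's own statement) =====
-- stated objective: faster
-- what changed: Replaces A's countdown scan over all overlap lengths (each testing a fresh pair of slices) by the KMP prefix-function automaton: build the failure table of next, stream previous through it once, and the final state is the maximal suffix-prefix overlap.
import Mathlib
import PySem

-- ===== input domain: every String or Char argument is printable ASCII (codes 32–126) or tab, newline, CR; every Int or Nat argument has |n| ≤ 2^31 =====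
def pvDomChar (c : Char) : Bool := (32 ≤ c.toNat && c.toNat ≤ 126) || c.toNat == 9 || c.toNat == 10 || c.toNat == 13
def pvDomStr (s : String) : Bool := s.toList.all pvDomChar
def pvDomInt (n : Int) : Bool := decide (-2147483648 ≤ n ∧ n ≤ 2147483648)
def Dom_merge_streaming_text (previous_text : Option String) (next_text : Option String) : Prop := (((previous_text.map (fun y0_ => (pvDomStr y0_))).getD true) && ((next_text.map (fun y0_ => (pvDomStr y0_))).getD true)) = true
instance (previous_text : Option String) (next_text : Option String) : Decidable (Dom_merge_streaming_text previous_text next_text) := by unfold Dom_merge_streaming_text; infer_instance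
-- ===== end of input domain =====

-- B replaces A's quadratic countdown over overlap lengths (two fresh slices per candidate) by the
-- linear-time KMP prefix-function automaton: build the failure table of `next`, stream `previous`
-- through it, and the final state is the maximal suffix/prefix overlap (objective: faster).


-- ===== PORT A =====
-- A's overlap loop: 'for overlap in range(max_overlap, 0, -1): if previous[-overlap:] == next_value[:overlap]: return previous + next_value[overlap:]'
def pvALoop (p n : List Char) : List Int → String
  | [] => String.ofList (p ++ n)
  | k :: ks =>
    if PySem.List.slice p (some (-k)) none = PySem.List.slice n none (some k) then
      String.ofList (p ++ PySem.List.slice n (some k) none)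
    else pvALoop p n ks

def merge_streaming_text (previous_text : Option String) (next_text : Option String) : String :=
  let previous := previous_text.getD ""          -- previous_text or ""
  let next_value := next_text.getD ""            -- next_text or ""
  if next_value = "" then previous
  else if previous = "" ∨ next_value = previous then next_value
  else if PySem.Str.startswith next_value previous = true ∨ 0 ≤ PySem.Str.find next_value previous then next_value
  else if PySem.Str.startswith previous next_value = true ∨ 0 ≤ PySem.Str.find previous next_value then previous
  else
    let p := previous.toList
    let n := next_value.toList
    let max_overlap : Int := min (p.length : Int) (n.length : Int)
    pvALoop p n (PySem.List.pyRange max_overlap 0 (-1))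

-- ===== PORT B =====
-- B's inner loop 'while k and c != nxt[k]: k = pi[k - 1]'.
-- The fuel (initially k) and the 'min … k' are only totality guards: the computed table always
-- has pi[k-1] ≤ k-1, so the chain strictly decreases and the fuel is never exhausted.
def pvFallGo (w : List Char) (pi : List Nat) (c : Char) : Nat → Nat → Nat
  | _, 0 => 0
  | 0, k + 1 => k + 1
  | f + 1, k + 1 =>
    if c = w.getD (k + 1) ' ' then k + 1
    else pvFallGo w pi c f (min (pi.getD k 0) k)

def pvFall (w : List Char) (pi : List Nat) (c : Char) (k : Nat) : Nat := pvFallGo w pi c k k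

-- one iteration body: the while loop, then 'if c == nxt[k]: k += 1'
def pvStep (w : List Char) (pi : List Nat) (c : Char) (k : Nat) : Nat :=
  let k' := pvFall w pi c k
  if c = w.getD k' ' ' then k' + 1 else k'

-- 'pi = [0]*len(nxt); k = 0; for i in range(1, len(nxt)): …; pi[i] = k'
def pvBuildPi (w : List Char) : List Nat :=
  ((List.range' 1 (w.length - 1)).foldl
    (fun st i => let k := pvStep w st.1 (w.getD i ' ') st.2; (st.1.set i k, k))
    (List.replicate w.length 0, 0)).1

def merge_streaming_text_alt (previous_text : Option String) (next_text : Option String) : String :=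
  let previous := previous_text.getD ""
  let nxt := next_text.getD ""
  if previous = "" then nxt
  else if nxt = "" then previous
  else if PySem.Str.isIn previous nxt then nxt
  else if PySem.Str.isIn nxt previous then previous
  else
    let w := nxt.toList
    let pi := pvBuildPi w
    -- 'k = 0; for c in previous: …'
    let k := previous.toList.foldl (fun k c => pvStep w pi c k) 0
    String.ofList (previous.toList ++ w.drop k)   -- 'previous + nxt[k:]'

-- ===== PRECONDITION & SPEC =====
def Spec_merge_streaming_text (previous_text : Option String) (next_text : Option String) (out : String) : Prop := out = merge_streaming_text_alt previous_text next_text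
instance (previous_text : Option String) (next_text : Option String) (out : String) : Decidable (Spec_merge_streaming_text previous_text next_text out) := by unfold Spec_merge_streaming_text; infer_instance

-- ===== CLAIM (what is proved, stated in full; the proofs are below) =====
def Claim_equal_merge_streaming_text : Prop := ∀ (previous_text : Option String) (next_text : Option String), Dom_merge_streaming_text previous_text next_text → Spec_merge_streaming_text previous_text next_text (merge_streaming_text previous_text next_text)

-- ===== LEMMAS AND PROOFS =====

-- longest j ≤ b with (w.take j) a suffix of t
def pvM (w t : List Char) (b : Nat) : Nat :=
  Nat.findGreatest (fun j => w.take j <:+ t) b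

lemma fg_eq {P Q : ℕ → Prop} [DecidablePred P] [DecidablePred Q] (b b' : ℕ)
    (h : ∀ j, 1 ≤ j → ((j ≤ b ∧ P j) ↔ (j ≤ b' ∧ Q j))) :
    Nat.findGreatest P b = Nat.findGreatest Q b' := by
  obtain ⟨hb, hP, hmax⟩ := (Nat.findGreatest_eq_iff (P := P)).mp (rfl : Nat.findGreatest P b = _)
  obtain ⟨hb', hQ, hmax'⟩ := (Nat.findGreatest_eq_iff (P := Q)).mp (rfl : Nat.findGreatest Q b' = _)
  apply le_antisymm
  · rcases Nat.eq_zero_or_pos (Nat.findGreatest P b) with h0 | h0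
    · omega
    · have := (h _ h0).mp ⟨hb, hP (by omega)⟩
      exact Nat.le_findGreatest this.1 this.2
  · rcases Nat.eq_zero_or_pos (Nat.findGreatest Q b') with h0 | h0
    · omega
    · have := (h _ h0).mpr ⟨hb', hQ (by omega)⟩
      exact Nat.le_findGreatest this.1 this.2

lemma suffix_snoc_iff (u t : List Char) (a c : Char) :
    u ++ [a] <:+ t ++ [c] ↔ a = c ∧ u <:+ t := by
  rw [← List.reverse_prefix, List.reverse_append, List.reverse_append]
  simp [List.cons_prefix_cons]

lemma take_snoc (w : List Char) (j : Nat) (hj : j < w.length) :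
    w.take (j + 1) = w.take j ++ [w.getD j ' '] := by
  rw [List.take_add_one, List.getElem?_eq_getElem hj, List.getD_eq_getElem _ _ hj]
  rfl

-- decomposition of 'take j w is a suffix of t ++ [c]' for 1 ≤ j ≤ |w|
lemma take_suffix_snoc (w t : List Char) (c : Char) (j : Nat) (h1 : 1 ≤ j) (h2 : j ≤ w.length) :
    (w.take j <:+ t ++ [c]) ↔ (w.take (j - 1) <:+ t ∧ w.getD (j - 1) ' ' = c) := by
  obtain ⟨j, rfl⟩ : ∃ j', j = j' + 1 := ⟨j - 1, by omega⟩
  rw [take_snoc w j (by omega), suffix_snoc_iff]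
  simp [and_comm]

lemma pvM_le (w t : List Char) (b : Nat) : pvM w t b ≤ b := Nat.findGreatest_le b

-- the maximal suffix-prefix overlap absorbs any smaller one
lemma pv_S1 (w t : List Char) (b j : Nat) (hb : b ≤ w.length) (hj : j ≤ b)
    (hs : w.take j <:+ t) : j ≤ pvM w t b ∧ w.take j <:+ w.take (pvM w t b) := by
  have h1 : j ≤ pvM w t b := Nat.le_findGreatest hj hs
  have h2 : w.take (pvM w t b) <:+ t :=
    Nat.findGreatest_spec (P := fun j => w.take j <:+ t) hj hs
  refine ⟨h1, List.suffix_of_suffix_length_le hs h2 ?_⟩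
  rw [List.length_take, List.length_take]
  omega

lemma pv_S2 (w t : List Char) (b j : Nat) (hj : j ≤ pvM w t b)
    (hs : w.take j <:+ w.take (pvM w t b)) : w.take j <:+ t ∧ j ≤ b := by
  have h2 : w.take (pvM w t b) <:+ t := by
    have h0 : w.take 0 <:+ t := by simp
    exact Nat.findGreatest_spec (P := fun j => w.take j <:+ t) (Nat.zero_le b) h0
  exact ⟨hs.trans h2, le_trans hj (pvM_le w t b)⟩

lemma pvFallGo_congr (w : List Char) (pi : List Nat) (c : Char) :
    ∀ f1 f2 k, k ≤ f1 → k ≤ f2 → pvFallGo w pi c f1 k = pvFallGo w pi c f2 k := by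
  intro f1
  induction f1 with
  | zero =>
    intro f2 k h1 _
    have hk : k = 0 := by omega
    subst hk
    cases f2 <;> rfl
  | succ f ih =>
    intro f2 k h1 h2
    rcases k with _ | k
    · cases f2 <;> rfl
    · rcases f2 with _ | f2
      · omega
      · simp only [pvFallGo]
        split_ifs with h
        · rfl
        · exact ih f2 _ (by omega) (by omega)

lemma pvFall_eq (w : List Char) (pi : List Nat) (c : Char) (k : Nat) :
    pvFall w pi c k
      = if k = 0 then k else if c = w.getD k ' ' then k
        else pvFall w pi c (min (pi.getD (k - 1) 0) (k - 1)) := by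
  rcases k with _ | k
  · rfl
  · rw [if_neg (Nat.succ_ne_zero k)]
    show pvFallGo w pi c (k + 1) (k + 1) = _
    simp only [pvFallGo]
    split_ifs with h
    · rfl
    · have e : k + 1 - 1 = k := rfl
      rw [e]
      exact pvFallGo_congr w pi c k (min (pi.getD k 0) k) _ (by omega) le_rfl

-- the central KMP step lemma: one loop-body execution computes the maximal extension
lemma pv_G (w : List Char) (pi : List Nat) (c : Char) :
    ∀ k, k < w.length →
    (∀ j, 1 ≤ j → j ≤ k → pi.getD (j - 1) 0 = pvM w (w.take j) (j - 1)) →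
    pvStep w pi c k = Nat.findGreatest (fun j => w.take j <:+ w.take k ++ [c]) (k + 1) := by
  intro k
  induction k using Nat.strong_induction_on with
  | _ k ih =>
    intro hk hpi
    rcases Nat.eq_zero_or_pos k with rfl | hk0
    · -- k = 0
      have hf : pvFall w pi c 0 = 0 := by rw [pvFall_eq]; simp
      have h1 : (w.take 1 <:+ w.take 0 ++ [c]) ↔ (w.getD 0 ' ' = c) := by
        rw [take_suffix_snoc w (w.take 0) c 1 le_rfl (by omega)]
        simp
      simp only [pvStep, hf]
      rw [Nat.findGreatest_succ, Nat.findGreatest_zero]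
      split_ifs with ha hb hb
      · rfl
      · exact absurd (h1.mpr ha.symm) hb
      · exact absurd (h1.mp hb).symm ha
      · rfl
    · by_cases hc : c = w.getD k ' '
      · -- the while loop exits immediately; the maximal extension is k+1
        have hf : pvFall w pi c k = k := by
          rw [pvFall_eq, if_neg (by omega : ¬ k = 0), if_pos hc]
        have hP : w.take (k + 1) <:+ w.take k ++ [c] := by
          exact (take_suffix_snoc w (w.take k) c (k + 1) (by omega) (by omega)).mpr
            ⟨by simp, hc.symm⟩
        simp only [pvStep, hf, if_pos hc]
        rw [Nat.findGreatest_succ, if_pos hP]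
      · -- the while loop follows one failure link: reduce to m = pi[k-1]
        have hm : pi.getD (k - 1) 0 = pvM w (w.take k) (k - 1) := hpi k hk0 le_rfl
        have hmk : pvM w (w.take k) (k - 1) ≤ k - 1 := pvM_le _ _ _
        have hf : pvFall w pi c k = pvFall w pi c (pvM w (w.take k) (k - 1)) := by
          rw [pvFall_eq, if_neg (by omega : ¬ k = 0), if_neg hc, hm, min_eq_left hmk]
        have hstep : pvStep w pi c k = pvStep w pi c (pvM w (w.take k) (k - 1)) := by
          simp only [pvStep, hf]
        have ihm := ih (pvM w (w.take k) (k - 1)) (by omega) (by omega)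
          (fun j h1 h2 => hpi j h1 (by omega))
        rw [hstep, ihm]
        apply fg_eq
        intro j hj
        constructor
        · rintro ⟨hjm, hs⟩
          obtain ⟨hs', hch⟩ := (take_suffix_snoc w _ c j hj (by omega)).mp hs
          obtain ⟨hst, hjb⟩ := pv_S2 w (w.take k) (k - 1) (j - 1) (by omega) hs'
          exact ⟨by omega, (take_suffix_snoc w _ c j hj (by omega)).mpr ⟨hst, hch⟩⟩
        · rintro ⟨hjk, hs⟩
          obtain ⟨hs', hch⟩ := (take_suffix_snoc w _ c j hj (by omega)).mp hs
          have hne : j - 1 ≠ k := by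
            intro h
            exact hc (by rw [← hch, h])
          obtain ⟨hjm, hsm⟩ := pv_S1 w (w.take k) (k - 1) (j - 1) (by omega) (by omega) hs'
          exact ⟨by omega, (take_suffix_snoc w _ c j hj (by omega)).mpr ⟨hsm, hch⟩⟩

lemma getD_set_self (l : List Nat) (i a : Nat) (h : i < l.length) :
    (l.set i a).getD i 0 = a := by
  simp [List.getD_eq_getElem?_getD, h]

lemma getD_set_ne (l : List Nat) (i j a : Nat) (h : i ≠ j) :
    (l.set i a).getD j 0 = l.getD j 0 := by
  simp [List.getD_eq_getElem?_getD, h]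

-- the partial state of the prefix-function loop after the first i iterations
def pvPiAux (w : List Char) (i : Nat) : List Nat × Nat :=
  (List.range' 1 i).foldl
    (fun st ix => let k := pvStep w st.1 (w.getD ix ' ') st.2; (st.1.set ix k, k))
    (List.replicate w.length 0, 0)

lemma pv_piInv (w : List Char) (hw : 0 < w.length) :
    ∀ i, i ≤ w.length - 1 →
      (pvPiAux w i).1.length = w.length ∧
      (∀ j, j < w.length →
        (pvPiAux w i).1.getD j 0 = if j ≤ i then pvM w (w.take (j + 1)) j else 0) ∧
      (pvPiAux w i).2 = pvM w (w.take (i + 1)) i := by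
  intro i
  induction i with
  | zero =>
    intro _
    refine ⟨by simp [pvPiAux], ?_, ?_⟩
    · intro j hj
      simp only [pvPiAux, List.range'_zero, List.foldl_nil]
      rw [List.getD_replicate _ hj]
      split_ifs with h
      · have hj0 : j = 0 := by omega
        subst hj0
        exact (Nat.findGreatest_zero).symm
      · rfl
    · simp only [pvPiAux, List.range'_zero, List.foldl_nil]
      exact (Nat.findGreatest_zero).symm
  | succ i ih =>
    intro hi
    obtain ⟨hlen, hent, hk⟩ := ih (by omega)
    have hunf : pvPiAux w (i + 1)
        = ((pvPiAux w i).1.set (i + 1) (pvStep w (pvPiAux w i).1 (w.getD (i + 1) ' ') (pvPiAux w i).2),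
           pvStep w (pvPiAux w i).1 (w.getD (i + 1) ' ') (pvPiAux w i).2) := by
      unfold pvPiAux
      rw [List.range'_1_concat, List.foldl_append, Nat.add_comm 1 i]
      rfl
    have hble := pvM_le w (w.take (i + 1)) i
    have hklt : pvM w (w.take (i + 1)) i < w.length := by omega
    have hpiG : ∀ j, 1 ≤ j → j ≤ pvM w (w.take (i + 1)) i →
        (pvPiAux w i).1.getD (j - 1) 0 = pvM w (w.take j) (j - 1) := by
      intro j h1 h2
      rw [hent (j - 1) (by omega), if_pos (by omega : j - 1 ≤ i)]
      have e : j - 1 + 1 = j := by omega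
      rw [e]
    have hstep : pvStep w (pvPiAux w i).1 (w.getD (i + 1) ' ') (pvPiAux w i).2
        = pvM w (w.take (i + 1 + 1)) (i + 1) := by
      rw [hk, pv_G w (pvPiAux w i).1 (w.getD (i + 1) ' ') (pvM w (w.take (i + 1)) i) hklt hpiG]
      have htk : w.take (i + 1 + 1) = w.take (i + 1) ++ [w.getD (i + 1) ' '] :=
        take_snoc w (i + 1) (by omega)
      conv_rhs => rw [pvM, htk]
      apply fg_eq
      intro j hj
      constructor
      · rintro ⟨hjm, hs⟩
        obtain ⟨hs', hch⟩ := (take_suffix_snoc w _ _ j hj (by omega)).mp hs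
        obtain ⟨hst, hjb⟩ := pv_S2 w (w.take (i + 1)) i (j - 1) (by omega) hs'
        exact ⟨by omega, (take_suffix_snoc w _ _ j hj (by omega)).mpr ⟨hst, hch⟩⟩
      · rintro ⟨hji, hs⟩
        obtain ⟨hs', hch⟩ := (take_suffix_snoc w _ _ j hj (by omega)).mp hs
        obtain ⟨hjm, hsm⟩ := pv_S1 w (w.take (i + 1)) i (j - 1) (by omega) (by omega) hs'
        exact ⟨by omega, (take_suffix_snoc w _ _ j hj (by omega)).mpr ⟨hsm, hch⟩⟩
    refine ⟨?_, ?_, ?_⟩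
    · rw [hunf]
      simp [List.length_set, hlen]
    · intro j hj
      rw [hunf]
      by_cases hje : j = i + 1
      · subst hje
        rw [getD_set_self _ _ _ (by rw [hlen]; omega), hstep, if_pos (le_refl _)]
      · rw [getD_set_ne _ _ _ _ (fun h => hje h.symm), hent j hj]
        split_ifs with h1 h2
        · rfl
        · omega
        · omega
        · rfl
    · rw [hunf]
      exact hstep

-- the prefix-function table is correct
lemma pv_buildPi (w : List Char) (hw : 0 < w.length) :
    ∀ j, 1 ≤ j → j ≤ w.length - 1 →
      (pvBuildPi w).getD (j - 1) 0 = pvM w (w.take j) (j - 1) := by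
  intro j h1 h2
  obtain ⟨hlen, hent, hk⟩ := pv_piInv w hw (w.length - 1) le_rfl
  have hdef : pvBuildPi w = (pvPiAux w (w.length - 1)).1 := rfl
  rw [hdef, hent (j - 1) (by omega), if_pos (by omega : j - 1 ≤ w.length - 1)]
  have e : j - 1 + 1 = j := by omega
  rw [e]

-- streaming the text through the automaton yields the maximal overlap
lemma pv_stream (w p : List Char) (pi : List Nat) (hw : 0 < w.length)
    (hpi : ∀ j, 1 ≤ j → j ≤ w.length - 1 → pi.getD (j - 1) 0 = pvM w (w.take j) (j - 1))
    (hni : ¬ w <:+: p) :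
    ∀ t, t <+: p → t.foldl (fun k c => pvStep w pi c k) 0 = pvM w t (w.length - 1) := by
  intro t
  induction t using List.reverseRecOn with
  | nil =>
    intro _
    simp only [List.foldl_nil]
    symm
    apply Nat.findGreatest_eq_zero_iff.mpr
    intro n h0 hb hs
    have h1 := List.suffix_nil.mp hs
    have h2 : (w.take n).length = 0 := by rw [h1]; rfl
    rw [List.length_take] at h2
    omega
  | append_singleton t c ih =>
    intro hpre
    have ht : t <+: p := (List.prefix_append t [c]).trans hpre
    rw [List.foldl_append, List.foldl_cons, List.foldl_nil, ih ht]
    have hb := pvM_le w t (w.length - 1)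
    have hklt : pvM w t (w.length - 1) < w.length := by omega
    rw [pv_G w pi c _ hklt (fun j h1 h2 => hpi j h1 (by omega))]
    apply fg_eq
    intro j hj
    constructor
    · rintro ⟨hjm, hs⟩
      obtain ⟨hs', hch⟩ := (take_suffix_snoc w _ c j hj (by omega)).mp hs
      obtain ⟨hst, hjb⟩ := pv_S2 w t (w.length - 1) (j - 1) (by omega) hs'
      have hsnoc : w.take j <:+ t ++ [c] := (take_suffix_snoc w t c j hj (by omega)).mpr ⟨hst, hch⟩
      have hjn : j ≠ w.length := by
        intro h
        apply hni
        have h2 := hsnoc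
        rw [h, List.take_length] at h2
        exact h2.isInfix.trans hpre.isInfix
      exact ⟨by omega, hsnoc⟩
    · rintro ⟨hjb, hs⟩
      obtain ⟨hs', hch⟩ := (take_suffix_snoc w t c j hj (by omega)).mp hs
      obtain ⟨hjm, hsm⟩ := pv_S1 w t (w.length - 1) (j - 1) (by omega) (by omega) hs'
      exact ⟨by omega, (take_suffix_snoc w _ c j hj (by omega)).mpr ⟨hsm, hch⟩⟩

-- ===== A-side reduction to a reference scan =====
def pvScan (p n : List Char) : Nat → String
  | 0 => String.ofList (p ++ n)
  | (k+1) => if p.drop (p.length - (k+1)) = n.take (k+1) then String.ofList (p ++ n.drop (k+1)) else pvScan p n k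

lemma pvALoop_eq_scan (p n : List Char) : ∀ k : Nat, pvALoop p n (PySem.List.pyRange (k : Int) 0 (-1)) = pvScan p n k := by
  intro k
  induction k with
  | zero => rw [PySem.List.pyRange_neg_one_eq_nil (by omega)]; rfl
  | succ k ih =>
      have hcons : PySem.List.pyRange ((k+1 : Nat) : Int) 0 (-1)
          = ((k+1 : Nat) : Int) :: PySem.List.pyRange ((k : Nat) : Int) 0 (-1) := by
        rw [PySem.List.pyRange_neg_one_cons (by exact_mod_cast Nat.succ_pos k)]
        norm_num
      rw [hcons]
      simp only [pvALoop, pvScan,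
        PySem.List.slice_from_neg_natCast p (k+1) (Nat.succ_pos k),
        PySem.List.slice_to_natCast, PySem.List.slice_from_natCast]
      split_ifs with h
      · rfl
      · exact ih

lemma pvScan_eq_findGreatest (p n : List Char) :
    ∀ m, pvScan p n m
      = String.ofList (p ++ n.drop (Nat.findGreatest (fun k => p.drop (p.length - k) = n.take k) m)) := by
  intro m
  induction m with
  | zero => rfl
  | succ m ih =>
      rw [pvScan, Nat.findGreatest_succ]
      split_ifs with h
      · rfl
      · exact ih

-- A's 'startswith or find >= 0' test is exactly substring containment
lemma pv_contains_iff (s sub : String) :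
    (PySem.Str.startswith s sub = true ∨ 0 ≤ PySem.Str.find s sub) ↔ PySem.Str.isIn sub s = true := by
  simp only [PySem.Str.startswith_eq, PySem.Str.find_eq, PySem.Str.isIn_eq]
  rw [PySem.Chars.isIn_iff_infix, PySem.Chars.startswith_iff, PySem.Chars.find_nonneg_iff]
  constructor
  · rintro (h | h)
    · exact h.isInfix
    · exact h
  · intro h; exact Or.inr h

-- in the non-degenerate branch both programs compute p ++ drop(maximal overlap) n
lemma pv_branch (previous nxt : String) (hp : previous ≠ "") (hn : nxt ≠ "")
    (h2 : ¬ PySem.Str.isIn nxt previous = true) :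
    pvALoop previous.toList nxt.toList
        (PySem.List.pyRange (min (previous.toList.length : Int) (nxt.toList.length : Int)) 0 (-1))
      = String.ofList (previous.toList ++
          nxt.toList.drop (previous.toList.foldl (fun k c => pvStep nxt.toList (pvBuildPi nxt.toList) c k) 0)) := by
  have hpl : previous.toList ≠ [] := by simp [String.toList_eq_nil_iff, hp]
  have hnl : nxt.toList ≠ [] := by simp [String.toList_eq_nil_iff, hn]
  have hp0 : 0 < previous.toList.length := List.length_pos_iff.mpr hpl
  have hn0 : 0 < nxt.toList.length := List.length_pos_iff.mpr hnl
  have hinf : ¬ nxt.toList <:+: previous.toList := by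
    intro h
    exact h2 (by rw [PySem.Str.isIn_eq]; exact (PySem.Chars.isIn_iff_infix _ _).mpr h)
  have hmin : (min (previous.toList.length : Int) (nxt.toList.length : Int))
      = ((min previous.toList.length nxt.toList.length : Nat) : Int) := by push_cast; rfl
  rw [hmin, pvALoop_eq_scan, pvScan_eq_findGreatest]
  rw [pv_stream nxt.toList previous.toList (pvBuildPi nxt.toList) hn0
        (pv_buildPi nxt.toList hn0) hinf previous.toList (List.prefix_refl _)]
  suffices h : Nat.findGreatest
      (fun k => previous.toList.drop (previous.toList.length - k) = nxt.toList.take k)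
      (min previous.toList.length nxt.toList.length)
      = pvM nxt.toList previous.toList (nxt.toList.length - 1) by rw [h]
  apply fg_eq
  intro j hj
  constructor
  · rintro ⟨hjm, he⟩
    have hjn' : j ≤ nxt.toList.length := by omega
    have hlen : (nxt.toList.take j).length = j := by rw [List.length_take]; omega
    have hs : nxt.toList.take j <:+ previous.toList := by
      rw [List.suffix_iff_eq_drop, hlen]
      exact he.symm
    have hjn : j ≠ nxt.toList.length := by
      intro h
      apply hinf
      have h3 := hs
      rw [h, List.take_length] at h3
      exact h3.isInfix
    exact ⟨by omega, hs⟩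
  · rintro ⟨hjb, hs⟩
    have hlen : (nxt.toList.take j).length = j := by rw [List.length_take]; omega
    have hle := hs.length_le
    rw [hlen] at hle
    have he : previous.toList.drop (previous.toList.length - j) = nxt.toList.take j := by
      have h3 := List.suffix_iff_eq_drop.mp hs
      rw [hlen] at h3
      exact h3.symm
    exact ⟨by omega, he⟩

lemma pv_main (previous nxt : String) :
    (if nxt = "" then previous
     else if previous = "" ∨ nxt = previous then nxt
     else if PySem.Str.startswith nxt previous = true ∨ 0 ≤ PySem.Str.find nxt previous then nxt
     else if PySem.Str.startswith previous nxt = true ∨ 0 ≤ PySem.Str.find previous nxt then previous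
     else pvALoop previous.toList nxt.toList
            (PySem.List.pyRange (min (previous.toList.length : Int) (nxt.toList.length : Int)) 0 (-1)))
    =
    (if previous = "" then nxt
     else if nxt = "" then previous
     else if PySem.Str.isIn previous nxt then nxt
     else if PySem.Str.isIn nxt previous then previous
     else String.ofList (previous.toList ++
            nxt.toList.drop (previous.toList.foldl (fun k c => pvStep nxt.toList (pvBuildPi nxt.toList) c k) 0))) := by
  by_cases hpe : previous = ""
  · subst hpe
    by_cases hne : nxt = ""
    · subst hne; simp
    · simp [hne]
  · by_cases hne : nxt = ""
    · subst hne; simp [hpe]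
    · rw [if_neg hne, if_neg hpe, if_neg hne]
      by_cases heq : nxt = previous
      · have hin : PySem.Str.isIn previous nxt = true := by
          rw [heq, PySem.Str.isIn_eq, PySem.Chars.isIn_iff_infix]
        rw [if_pos (Or.inr heq), if_pos hin]
      · rw [if_neg (fun h => h.elim hpe heq)]
        by_cases h1 : PySem.Str.isIn previous nxt = true
        · rw [if_pos ((pv_contains_iff nxt previous).mpr h1), if_pos h1]
        · rw [if_neg (fun hc => h1 ((pv_contains_iff nxt previous).mp hc)), if_neg h1]
          by_cases h2 : PySem.Str.isIn nxt previous = true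
          · rw [if_pos ((pv_contains_iff previous nxt).mpr h2), if_pos h2]
          · rw [if_neg (fun hc => h2 ((pv_contains_iff previous nxt).mp hc)), if_neg h2]
            exact pv_branch previous nxt hpe hne h2

-- ===== VERDICT (by name: the statement is the Claim_ definition above) =====
theorem merge_streaming_text_spec : Claim_equal_merge_streaming_text := by
  intro previous_text next_text _
  unfold Spec_merge_streaming_text merge_streaming_text merge_streaming_text_alt
  exact pv_main (previous_text.getD "") (next_text.getD "")
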